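-- pv_equiv track=rewrite | github.com/981377660LMT/algorithm-study | 2_queue/3679. 使库存平衡的最少丢弃次数.py | minArrivalsToDiscard
-- ===== SOURCE A (Python) =====
-- from typing import List
-- from collections import defaultdict, deque
--
-- def minArrivalsToDiscard(arrivals: List[int], w: int, m: int) -> int:
--     queue = deque()
--     counter = defaultdict(int)
--     res = 0
--     for i, v in enumerate(arrivals):
--         while queue and queue[0][0] <= i - w:
--             _, t = queue.popleft()
--             counter[t] -= 1
--         if counter[v] >= m:
--             res += 1
--         else:
--             queue.append((i, v))
--             counter[v] += 1
--     return res
-- ===== SOURCE B (Python) =====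
-- def minArrivalsToDiscard(arrivals, w, m):
--     # Decisions decouple by type: counter[v] only ever depends on accepted
--     # arrivals of the same value v, so each distinct value can be processed
--     # independently on its own occurrence positions and the discards summed.
--     pos = {}
--     for i, x in enumerate(arrivals):
--         pos.setdefault(x, []).append(i)
--     res = 0
--     for v in dict.fromkeys(arrivals):
--         accepted = []  # accepted positions of this value, increasing
--         lo = 0         # first accepted position still inside the window
--         for i in pos.get(v, []):
--             while lo < len(accepted) and accepted[lo] <= i - w:
--                 lo += 1
--             if len(accepted) - lo >= m:
--                 res += 1
--             else:
--                 accepted.append(i)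
--     return res
-- ===== Notes on version B (the rewrite author's own statement) =====
-- stated objective: alternative
-- what changed: Replaces A's single global pass with a deque+counter by a per-value decomposition: since the accept/discard decision for a value depends only on previously accepted arrivals of the same value, B first groups the occurrence positions by value in one pass, then runs an independent two-pointer window scan per distinct value and sums the discards; no queue and no shared counter exist.
import Mathlib
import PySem

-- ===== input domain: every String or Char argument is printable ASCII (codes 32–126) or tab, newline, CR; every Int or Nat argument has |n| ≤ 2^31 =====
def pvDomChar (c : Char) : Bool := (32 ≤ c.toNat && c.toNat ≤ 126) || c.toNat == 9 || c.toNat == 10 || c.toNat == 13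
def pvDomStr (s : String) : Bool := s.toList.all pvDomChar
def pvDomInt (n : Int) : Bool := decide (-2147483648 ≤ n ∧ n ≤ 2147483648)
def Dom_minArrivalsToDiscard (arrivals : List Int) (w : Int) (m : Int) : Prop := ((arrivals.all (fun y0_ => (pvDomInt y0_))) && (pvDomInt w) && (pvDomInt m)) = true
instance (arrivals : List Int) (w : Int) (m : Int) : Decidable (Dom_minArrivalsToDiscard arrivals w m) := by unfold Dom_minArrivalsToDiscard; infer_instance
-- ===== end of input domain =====

-- B replaces A's single global deque+counter pass by independent per-distinct-value window
-- scans over each value's occurrence positions, summing the discards (objective: alternative).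


-- ===== PORT A =====
-- while queue and queue[0][0] <= i - w: _, t = queue.popleft(); counter[t] -= 1
def pvPopWhile (i w : Int) : List (Int × Int) → PySem.Dict Int Int → (List (Int × Int) × PySem.Dict Int Int)
  | [], c => ([], c)
  | (j, t) :: rest, c =>
      if j ≤ i - w then pvPopWhile i w rest (c.insert t (c.getD t 0 - 1))
      else ((j, t) :: rest, c)

-- the 'for i, v in enumerate(arrivals)' loop with state (i, queue, counter, res)
def pvLoopA (w m : Int) : List Int → Int → List (Int × Int) → PySem.Dict Int Int → Int → Int
  | [], _, _, _, res => res
  | v :: vs, i, q, c, res =>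
      let p := pvPopWhile i w q c
      if p.2.getD v 0 ≥ m then pvLoopA w m vs (i + 1) p.1 p.2 (res + 1)
      else pvLoopA w m vs (i + 1) (p.1 ++ [(i, v)]) (p.2.insert v (p.2.getD v 0 + 1)) res

def minArrivalsToDiscard (arrivals : List Int) (w : Int) (m : Int) : Int :=
  pvLoopA w m arrivals 0 [] PySem.Dict.empty 0

-- ===== PORT B =====
-- pos.setdefault(x, []).append(i) over enumerate(arrivals): group the positions by value
def pvBuildPos : List (Int × Int) → PySem.Dict Int (List Int) → PySem.Dict Int (List Int)
  | [], d => d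
  | (i, x) :: rest, d => pvBuildPos rest (d.insert x (d.getD x [] ++ [i]))

-- while lo < len(accepted) and accepted[lo] <= i - w: lo += 1
def pvSkip (iw : Int) (acc : List Int) (lo : Nat) : Nat :=
  if h : lo < acc.length then
    if acc[lo] ≤ iw then pvSkip iw acc (lo + 1) else lo
  else lo
termination_by acc.length - lo

-- inner 'for i in pos.get(v, [])' loop of Source B, state (accepted, lo, res)
def pvInnerB (w m : Int) : List Int → List Int → Nat → Int → Int
  | [], _, _, res => res
  | i :: is, acc, lo, res =>
      let lo1 := pvSkip (i - w) acc lo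
      if (acc.length : Int) - lo1 ≥ m then pvInnerB w m is acc lo1 (res + 1)
      else pvInnerB w m is (acc ++ [i]) lo1 res

-- 'for v in dict.fromkeys(arrivals)' = fold over PySem.List.dedup ('pos' inlined)
def minArrivalsToDiscard_alt (arrivals : List Int) (w : Int) (m : Int) : Int :=
  (PySem.List.dedup arrivals).foldl
    (fun res v => pvInnerB w m
      ((pvBuildPos (PySem.List.enumerate arrivals 0) PySem.Dict.empty).getD v []) [] 0 res) 0

-- ===== PRECONDITION & SPEC =====
def Spec_minArrivalsToDiscard (arrivals : List Int) (w : Int) (m : Int) (out : Int) : Prop := out = minArrivalsToDiscard_alt arrivals w m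
instance (arrivals : List Int) (w : Int) (m : Int) (out : Int) : Decidable (Spec_minArrivalsToDiscard arrivals w m out) := by unfold Spec_minArrivalsToDiscard; infer_instance

-- ===== CLAIM =====
def Claim_equal_minArrivalsToDiscard : Prop := ∀ (arrivals : List Int) (w : Int) (m : Int), Dom_minArrivalsToDiscard arrivals w m → Spec_minArrivalsToDiscard arrivals w m (minArrivalsToDiscard arrivals w m)

-- ===== LEMMAS AND PROOFS =====

-- B's per-value window scan with the two-pointer replaced by an eager filter (proof-only form)
def pvF (w m : Int) : List Int → List Int → Int → Int
  | [], _, res => res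
  | i :: is, acc, res =>
      let acc1 := acc.filter (fun j => decide (j > i - w))
      if (acc1.length : Int) ≥ m then pvF w m is acc1 (res + 1)
      else pvF w m is (acc1 ++ [i]) res

-- occurrence positions of value v in the suffix starting at index i
def pvOcc (v : Int) : List Int → Int → List Int
  | [], _ => []
  | x :: xs, i => if x = v then i :: pvOcc v xs (i + 1) else pvOcc v xs (i + 1)

-- A's loop with the lazy deque eviction replaced by an eager filter (intermediate form)
def pvLoopD (w m : Int) : List Int → Int → List (Int × Int) → Int → Int
  | [], _, _, res => res
  | v :: vs, i, Q, res =>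
      let Q' := Q.filter (fun p => decide (p.1 > i - w))
      if ((Q'.filter (fun p => decide (p.2 = v))).length : Int) ≥ m then
        pvLoopD w m vs (i + 1) Q' (res + 1)
      else pvLoopD w m vs (i + 1) (Q' ++ [(i, v)]) res

-- the positions of type t in a queue
def pvProj (t : Int) (Q : List (Int × Int)) : List Int :=
  (Q.filter (fun p => decide (p.2 = t))).map (·.1)

lemma pvF_offset (w m : Int) :
    ∀ (is acc : List Int) (res : Int), pvF w m is acc res = res + pvF w m is acc 0 := by
  intro is
  induction is with
  | nil => intro acc res; simp [pvF]
  | cons i rest ih =>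
      intro acc res
      simp only [pvF]
      split_ifs with h
      · rw [ih _ (res + 1), ih _ (0 + 1)]; ring
      · exact ih _ _

lemma pvInnerB_offset (w m : Int) :
    ∀ (is acc : List Int) (lo : Nat) (res : Int),
      pvInnerB w m is acc lo res = res + pvInnerB w m is acc lo 0 := by
  intro is
  induction is with
  | nil => intro acc lo res; simp [pvInnerB]
  | cons i rest ih =>
      intro acc lo res
      simp only [pvInnerB]
      split_ifs with h
      · rw [ih _ _ (res + 1), ih _ _ (0 + 1)]; ring
      · exact ih _ _ _

lemma pvFold_eq_sum (w m : Int) (g : Int → List Int) :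
    ∀ (S : List Int) (res : Int),
      S.foldl (fun res v => pvInnerB w m (g v) [] 0 res) res
        = res + (S.map (fun v => pvInnerB w m (g v) [] 0 0)).sum := by
  intro S
  induction S with
  | nil => intro res; simp
  | cons v rest ih =>
      intro res
      simp only [List.foldl_cons, List.map_cons, List.sum_cons]
      rw [ih, pvInnerB_offset]
      ring

-- ---- facts about pvOcc, filters, pvProj ----
lemma pvOcc_ge (v : Int) : ∀ (vs : List Int) (i : Int), ∀ j ∈ pvOcc v vs i, i ≤ j := by
  intro vs
  induction vs with
  | nil => intro i j hj; simp [pvOcc] at hj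
  | cons x xs ih =>
      intro i j hj
      by_cases hx : x = v
      · simp only [pvOcc, if_pos hx, List.mem_cons] at hj
        rcases hj with rfl | hj
        · omega
        · have := ih (i + 1) j hj; omega
      · simp only [pvOcc, if_neg hx] at hj
        have := ih (i + 1) j hj; omega

lemma pvBuild_getD (v : Int) :
    ∀ (vs : List Int) (i : Int) (d : PySem.Dict Int (List Int)),
      (pvBuildPos (PySem.List.enumerate vs i) d).getD v []
        = d.getD v [] ++ pvOcc v vs i := by
  intro vs
  induction vs with
  | nil => intro i d; simp [pvBuildPos, pvOcc, PySem.List.enumerate_nil]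
  | cons x xs ih =>
      intro i d
      rw [PySem.List.enumerate_cons]
      simp only [pvBuildPos]
      rw [ih, PySem.Dict.getD_insert]
      by_cases hx : x = v
      · subst hx
        rw [if_pos rfl]
        simp [pvOcc]
      · rw [if_neg (fun h => hx h.symm)]
        simp [pvOcc, hx]

lemma pvSkip_spec (iw : Int) (acc : List Int) :
    ∀ (n lo : Nat), acc.length - lo = n → lo ≤ acc.length →
      lo ≤ pvSkip iw acc lo ∧ pvSkip iw acc lo ≤ acc.length ∧
      acc.drop (pvSkip iw acc lo) = (acc.drop lo).dropWhile (fun j => decide (j ≤ iw)) := by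
  intro n
  induction n with
  | zero =>
      intro lo hn hle
      have hlo : lo = acc.length := by omega
      rw [pvSkip, dif_neg (by omega)]
      subst hlo
      simp
  | succ n ih =>
      intro lo hn hle
      have hlt : lo < acc.length := by omega
      have hdrop : acc.drop lo = acc[lo] :: acc.drop (lo + 1) := List.drop_eq_getElem_cons hlt
      rw [pvSkip, dif_pos hlt]
      by_cases hcmp : acc[lo] ≤ iw
      · rw [if_pos hcmp]
        obtain ⟨h1, h2, h3⟩ := ih (lo + 1) (by omega) (by omega)
        refine ⟨by omega, h2, ?_⟩
        rw [h3, hdrop, List.dropWhile_cons]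
        simp [hcmp]
      · rw [if_neg hcmp]
        refine ⟨le_refl _, by omega, ?_⟩
        rw [hdrop, List.dropWhile_cons]
        simp [hcmp]

lemma pvDropWhile_eq_filter (iw : Int) :
    ∀ (F : List Int), F.Pairwise (· < ·) →
      F.dropWhile (fun j => decide (j ≤ iw)) = F.filter (fun j => decide (j > iw)) := by
  intro F
  induction F with
  | nil => intro _; rfl
  | cons a rest ih =>
      intro hpw
      by_cases ha : a ≤ iw
      · rw [List.dropWhile_cons, if_pos (by simpa using ha),
            List.filter_cons, if_neg (by simp; omega)]
        exact ih (List.Pairwise.of_cons hpw)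
      · rw [List.dropWhile_cons, if_neg (by simpa using ha),
            List.filter_cons, if_pos (by simp; omega)]
        rw [List.filter_eq_self.mpr]
        intro b hb
        have hab := (List.pairwise_cons.mp hpw).1 b hb
        simp only [decide_eq_true_eq]
        omega

lemma pvOcc_pairwise (v : Int) : ∀ (vs : List Int) (i : Int), (pvOcc v vs i).Pairwise (· < ·) := by
  intro vs
  induction vs with
  | nil => intro i; simp [pvOcc]
  | cons x xs ih =>
      intro i
      by_cases hx : x = v
      · simp only [pvOcc, if_pos hx]
        rw [List.pairwise_cons]
        exact ⟨fun j hj => by have := pvOcc_ge v xs (i + 1) j hj; omega, ih (i + 1)⟩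
      · simp only [pvOcc, if_neg hx]
        exact ih (i + 1)

-- the two-pointer loop computes the filter loop on the in-window suffix
lemma pvInnerB_eq_pvF (w m : Int) :
    ∀ (is acc : List Int) (lo : Nat) (res : Int),
      lo ≤ acc.length → acc.Pairwise (· < ·) →
      (∀ j ∈ acc, ∀ k ∈ is, j < k) → is.Pairwise (· < ·) →
      pvInnerB w m is acc lo res = pvF w m is (acc.drop lo) res := by
  intro is
  induction is with
  | nil => intro acc lo res _ _ _ _; rfl
  | cons i rest ih =>
      intro acc lo res hle hacc hsep his
      obtain ⟨h1, h2, h3⟩ := pvSkip_spec (i - w) acc (acc.length - lo) lo rfl hle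
      have hpwdrop : (acc.drop lo).Pairwise (· < ·) :=
        List.Pairwise.sublist (List.drop_sublist lo acc) hacc
      have hdw : acc.drop (pvSkip (i - w) acc lo)
          = (acc.drop lo).filter (fun j => decide (j > i - w)) := by
        rw [h3, pvDropWhile_eq_filter (i - w) _ hpwdrop]
      have hlen : ((acc.length : Int) - (pvSkip (i - w) acc lo) : Int)
          = (((acc.drop lo).filter (fun j => decide (j > i - w))).length : Int) := by
        rw [← hdw, List.length_drop]
        omega
      simp only [pvInnerB, pvF]
      rw [hlen]
      have hsep' : ∀ j ∈ acc, ∀ k ∈ rest, j < k :=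
        fun j hj k hk => hsep j hj k (List.mem_cons_of_mem _ hk)
      have his' : rest.Pairwise (· < ·) := List.Pairwise.of_cons his
      split_ifs with hcond
      · rw [ih acc (pvSkip (i - w) acc lo) (res + 1) h2 hacc hsep' his', hdw]
      · rw [ih (acc ++ [i]) (pvSkip (i - w) acc lo) res
              (by simp; omega)
              (by rw [List.pairwise_append]
                  exact ⟨hacc, List.pairwise_singleton _ _,
                    fun a ha b hb => by
                      rw [List.mem_singleton] at hb
                      rw [hb]
                      exact hsep a ha i (List.mem_cons_self)⟩)
              (by intro j hj k hk
                  rcases List.mem_append.mp hj with hj' | hj'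
                  · exact hsep j hj' k (List.mem_cons_of_mem _ hk)
                  · rw [List.mem_singleton] at hj'
                    rw [hj']
                    exact (List.pairwise_cons.mp his).1 k hk)
              his']
        rw [List.drop_append_of_le_length h2, hdw]

lemma pvFilter_subsume (w i i' : Int) (h : i ≤ i') (acc : List Int) :
    (acc.filter (fun j => decide (j > i - w))).filter (fun j => decide (j > i' - w))
      = acc.filter (fun j => decide (j > i' - w)) := by
  induction acc with
  | nil => rfl
  | cons a rest ih =>
      by_cases h1 : a > i - w
      · by_cases h2 : a > i' - w <;>
          simp [h1, h2, ih]
      · have h2 : ¬ a > i' - w := by omega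
        simp [h1, h2, ih]

lemma pvF_prefilter (w m i : Int) :
    ∀ (is : List Int), (∀ j ∈ is, i ≤ j) → ∀ (acc : List Int) (res : Int),
      pvF w m is (acc.filter (fun j => decide (j > i - w))) res = pvF w m is acc res := by
  intro is his acc res
  cases is with
  | nil => rfl
  | cons i' rest =>
      have hi : i ≤ i' := his i' (List.mem_cons_self)
      simp only [pvF, pvFilter_subsume w i i' hi acc]

lemma pvProj_filter (t w i : Int) (Q : List (Int × Int)) :
    pvProj t (Q.filter (fun p => decide (p.1 > i - w)))
      = (pvProj t Q).filter (fun j => decide (j > i - w)) := by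
  induction Q with
  | nil => rfl
  | cons p rest ih =>
      obtain ⟨j, x⟩ := p
      by_cases h1 : j > i - w <;> by_cases h2 : x = t <;>
        simp [pvProj, h1, h2] at ih ⊢ <;> exact ih

lemma pvProj_append (t v i : Int) (Q : List (Int × Int)) :
    pvProj t (Q ++ [(i, v)]) = if v = t then pvProj t Q ++ [i] else pvProj t Q := by
  by_cases h : v = t <;> simp [pvProj, List.filter_append, h]

lemma pvProj_length (v : Int) (Q : List (Int × Int)) :
    (pvProj v Q).length = (Q.filter (fun p => decide (p.2 = v))).length := by
  simp [pvProj]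

-- ---- sum surgery ----
lemma pvSum_update (S : List Int) (f g : Int → Int) (v : Int)
    (hnd : S.Nodup) (hv : v ∈ S) (hfg : ∀ t ∈ S, t ≠ v → f t = g t) :
    (S.map f).sum = (S.map g).sum + (f v - g v) := by
  induction S with
  | nil => simp at hv
  | cons a rest ih =>
      simp only [List.map_cons, List.sum_cons]
      rcases List.mem_cons.mp hv with rfl | hv'
      · have : rest.map f = rest.map g := by
          apply List.map_congr_left
          intro t ht
          exact hfg t (List.mem_cons_of_mem _ ht) (fun h => (List.nodup_cons.mp hnd).1 (h ▸ ht))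
        rw [this]; ring
      · have ha : a ≠ v := fun h => (List.nodup_cons.mp hnd).1 (h ▸ hv')
        rw [hfg a (List.mem_cons_self) ha,
            ih (List.nodup_cons.mp hnd).2 hv' (fun t ht => hfg t (List.mem_cons_of_mem _ ht))]
        ring

-- ---- stage 2: the eager-filter loop decomposes into per-value loops ----
lemma pvD_decompose (w m : Int) :
    ∀ (vs : List Int) (i : Int) (Q : List (Int × Int)) (res : Int) (S : List Int),
      S.Nodup → (∀ x ∈ vs, x ∈ S) →
      pvLoopD w m vs i Q res
        = res + (S.map (fun t => pvF w m (pvOcc t vs i) (pvProj t Q) 0)).sum := by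
  intro vs
  induction vs with
  | nil =>
      intro i Q res S _ _
      have : S.map (fun t => pvF w m (pvOcc t [] i) (pvProj t Q) 0) = S.map (fun _ => 0) := by
        apply List.map_congr_left; intro t _; rfl
      simp [pvLoopD, this]
  | cons v rest ih =>
      intro i Q res S hnd hmem
      have hvS : v ∈ S := hmem v (List.mem_cons_self)
      have hmem' : ∀ x ∈ rest, x ∈ S := fun x hx => hmem x (List.mem_cons_of_mem _ hx)
      set Q' := Q.filter (fun p => decide (p.1 > i - w)) with hQ'
      -- the head term of the decomposition, unfolded one step
      have hocc_v : pvOcc v (v :: rest) i = i :: pvOcc v rest (i + 1) := by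
        simp [pvOcc]
      have hocc_ne : ∀ t, t ≠ v → pvOcc t (v :: rest) i = pvOcc t rest (i + 1) := by
        intro t ht; simp only [pvOcc, if_neg (fun h : v = t => ht h.symm)]
      have hacc1 : (pvProj v Q).filter (fun j => decide (j > i - w)) = pvProj v Q' := by
        rw [hQ', pvProj_filter]
      have hlen : ((pvProj v Q').length : Int)
          = ((Q'.filter (fun p => decide (p.2 = v))).length : Int) := by
        exact_mod_cast pvProj_length v Q' 
      have hne_term : ∀ t ∈ S, t ≠ v →
          pvF w m (pvOcc t (v :: rest) i) (pvProj t Q) 0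
            = pvF w m (pvOcc t rest (i + 1)) (pvProj t Q') 0 := by
        intro t _ ht
        rw [hocc_ne t ht, hQ', pvProj_filter]
        exact (pvF_prefilter w m i _ (fun j hj => by have := pvOcc_ge t rest (i + 1) j hj; omega) _ _).symm
      by_cases hc : ((Q'.filter (fun p => decide (p.2 = v))).length : Int) ≥ m
      · -- discard branch
        have hstep : pvLoopD w m (v :: rest) i Q res = pvLoopD w m rest (i + 1) Q' (res + 1) := by
          simp only [pvLoopD]; rw [if_pos hc]
        rw [hstep, ih (i + 1) Q' (res + 1) S hnd hmem']
        have hfv : pvF w m (pvOcc v (v :: rest) i) (pvProj v Q) 0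
            = 1 + pvF w m (pvOcc v rest (i + 1)) (pvProj v Q') 0 := by
          rw [hocc_v]
          simp only [pvF, hacc1]
          rw [if_pos (by rw [hlen]; exact hc), pvF_offset]
          ring
        rw [pvSum_update S
              (fun t => pvF w m (pvOcc t (v :: rest) i) (pvProj t Q) 0)
              (fun t => pvF w m (pvOcc t rest (i + 1)) (pvProj t Q') 0)
              v hnd hvS hne_term, hfv]
        ring
      · -- accept branch
        have hstep : pvLoopD w m (v :: rest) i Q res
            = pvLoopD w m rest (i + 1) (Q' ++ [(i, v)]) res := by
          simp only [pvLoopD]; rw [if_neg hc]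
        rw [hstep, ih (i + 1) (Q' ++ [(i, v)]) res S hnd hmem']
        congr 1
        apply congrArg
        apply List.map_congr_left
        intro t htS
        by_cases ht : t = v
        · subst ht
          rw [hocc_v]
          simp only [pvF, hacc1]
          rw [if_neg (by rw [hlen]; exact hc), pvProj_append]
          simp
        · rw [hne_term t htS ht, pvProj_append, if_neg (fun h => ht h.symm)]

-- ---- stage 1: A's lazy deque loop equals the eager-filter loop ----
lemma pvPop_spec (i w : Int) :
    ∀ (Q : List (Int × Int)) (c : PySem.Dict Int Int),
      Q.Pairwise (fun p q => p.1 < q.1) →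
      (∀ t, c.getD t 0 = ((Q.filter (fun p => decide (p.2 = t))).length : Int)) →
      (pvPopWhile i w Q c).1 = Q.filter (fun p => decide (p.1 > i - w)) ∧
      (∀ t, (pvPopWhile i w Q c).2.getD t 0
          = (((Q.filter (fun p => decide (p.1 > i - w))).filter (fun p => decide (p.2 = t))).length : Int)) := by
  intro Q
  induction Q with
  | nil => intro c _ hc; exact ⟨rfl, by simpa using hc⟩
  | cons p rest ih =>
      intro c hpw hc
      obtain ⟨j, t0⟩ := p
      by_cases hj : j ≤ i - w
      · have hfilt : ¬ ((j, t0).1 > i - w) := by simp; omega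
        have hc1 : ∀ t, (c.insert t0 (c.getD t0 0 - 1)).getD t 0
            = ((rest.filter (fun p => decide (p.2 = t))).length : Int) := by
          intro t
          rw [PySem.Dict.getD_insert]
          by_cases ht : t = t0
          · subst ht
            rw [if_pos rfl]
            have := hc t
            simp at this
            omega
          · rw [if_neg ht]
            have := hc t
            simp only [List.filter_cons, decide_eq_true_eq,
              if_neg (fun h : t0 = t => ht h.symm)] at this
            exact this
        have hrec := ih (c.insert t0 (c.getD t0 0 - 1)) (List.Pairwise.of_cons hpw) hc1
        constructor
        · show (pvPopWhile i w ((j, t0) :: rest) c).1 = _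
          rw [pvPopWhile, if_pos hj]
          rw [List.filter_cons, if_neg (by simpa using hfilt)]
          exact hrec.1
        · intro t
          show (pvPopWhile i w ((j, t0) :: rest) c).2.getD t 0 = _
          rw [pvPopWhile, if_pos hj]
          rw [List.filter_cons, if_neg (by simpa using hfilt)]
          exact hrec.2 t
      · have hall : ∀ p ∈ (j, t0) :: rest, decide (p.1 > i - w) = true := by
          intro p hp
          rcases List.mem_cons.mp hp with rfl | hp'
          · simp; omega
          · have := (List.pairwise_cons.mp hpw).1 p hp'
            simp; omega
        have hfe : ((j, t0) :: rest).filter (fun p => decide (p.1 > i - w)) = (j, t0) :: rest :=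
          List.filter_eq_self.mpr hall
        constructor
        · show (pvPopWhile i w ((j, t0) :: rest) c).1 = _
          rw [pvPopWhile, if_neg hj, hfe]
        · intro t
          show (pvPopWhile i w ((j, t0) :: rest) c).2.getD t 0 = _
          rw [pvPopWhile, if_neg hj, hfe]
          exact hc t

lemma pvA_eq_pvD (w m : Int) :
    ∀ (vs : List Int) (i : Int) (Q : List (Int × Int)) (c : PySem.Dict Int Int) (res : Int),
      Q.Pairwise (fun p q => p.1 < q.1) →
      (∀ p ∈ Q, p.1 < i) →
      (∀ t, c.getD t 0 = ((Q.filter (fun p => decide (p.2 = t))).length : Int)) →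
      pvLoopA w m vs i Q c res = pvLoopD w m vs i Q res := by
  intro vs
  induction vs with
  | nil => intro i Q c res _ _ _; rfl
  | cons v rest ih =>
      intro i Q c res hpw hbd hc
      obtain ⟨h1, h2⟩ := pvPop_spec i w Q c hpw hc
      set Q' := Q.filter (fun p => decide (p.1 > i - w)) with hQ'
      have hpw' : Q'.Pairwise (fun p q => p.1 < q.1) := List.Pairwise.sublist List.filter_sublist hpw
      have hbd' : ∀ p ∈ Q', p.1 < i + 1 := by
        intro p hp
        have := hbd p (List.mem_of_mem_filter hp); omega
      simp only [pvLoopA, pvLoopD, h1, h2 v]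
      by_cases hcnd : ((Q'.filter (fun p => decide (p.2 = v))).length : Int) ≥ m
      · rw [if_pos hcnd, if_pos hcnd]
        exact ih (i + 1) Q' _ (res + 1) hpw' hbd' h2
      · rw [if_neg hcnd, if_neg hcnd]
        apply ih (i + 1) (Q' ++ [(i, v)]) _ res
        · rw [List.pairwise_append]
          exact ⟨hpw', List.pairwise_singleton _ _,
            fun p hp q hq => by
              rw [List.mem_singleton] at hq
              subst hq
              have := hbd p (List.mem_of_mem_filter hp)
              simpa using this⟩
        · intro p hp
          rcases List.mem_append.mp hp with hp' | hp'
          · exact hbd' p hp'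
          · rw [List.mem_singleton] at hp'; subst hp'; simp
        · intro t
          rw [PySem.Dict.getD_insert, List.filter_append]
          by_cases ht : t = v
          · subst ht
            rw [if_pos rfl]
            simp
          · rw [if_neg ht, h2 t]
            have hvt : ¬ v = t := fun h => ht h.symm
            simp [hvt]

-- ===== VERDICT =====
theorem minArrivalsToDiscard_spec : Claim_equal_minArrivalsToDiscard := by
  unfold Claim_equal_minArrivalsToDiscard
  intro arrivals w m _
  unfold Spec_minArrivalsToDiscard minArrivalsToDiscard minArrivalsToDiscard_alt
  rw [pvA_eq_pvD w m arrivals 0 [] PySem.Dict.empty 0 (List.Pairwise.nil)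
        (by intro p hp; simp at hp)
        (by intro t; simp [PySem.Dict.getD_empty])]
  rw [pvD_decompose w m arrivals 0 [] 0 (PySem.List.dedup arrivals)
        (PySem.List.nodup_dedup arrivals)
        (fun x hx => (PySem.List.mem_dedup arrivals x).mpr hx)]
  rw [pvFold_eq_sum]
  congr 1
  apply congrArg
  apply List.map_congr_left
  intro v _
  rw [pvBuild_getD,
      pvInnerB_eq_pvF w m _ [] 0 0 (by simp) List.Pairwise.nil (by simp)
        (by simpa [PySem.Dict.getD_empty] using pvOcc_pairwise v arrivals 0)]
  simp [PySem.Dict.getD_empty, pvProj]
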